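-- pv_equiv track=rewrite | github.com/Kshitijkumar15/DSA | learning/maxProfit.py | maximize_profits
-- ===== SOURCE A (Python) =====
-- def maximize_profits(cut_cost, unit_price, num_sausages, lengths):
--     max_length = max(lengths)
--     max_profit = 0
--
--     for L in range(1, max_length + 1):
--         total_length = sum(max(0, sausage - L) for sausage in lengths)
--         total_cut_cost = total_length * cut_cost
--         total_profit = total_length * L * unit_price - total_cut_cost
--
--         max_profit = max(max_profit, total_profit)
--
--     return max_profit
-- ===== SOURCE B (Python) =====
-- def maximize_profits(cut_cost, unit_price, num_sausages, lengths):
--     max_length = max(lengths)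
--     cnt = {}
--     for s in lengths:
--         cnt[s] = cnt.get(s, 0) + 1
--     best = 0
--     n_above = 0
--     sum_above = 0
--     for L in range(max_length, 0, -1):
--         profit = (sum_above - n_above * L) * (L * unit_price - cut_cost)
--         if profit > best:
--             best = profit
--         c = cnt.get(L, 0)
--         n_above += c
--         sum_above += L * c
--     return best
-- ===== Notes on version B (the rewrite author's own statement) =====
-- stated objective: faster
-- what changed: Replaces the per-L rescan of all sausages by a single counting dict plus one descending sweep over L that maintains the running count and sum of lengths above L, so each L costs O(1).
import Mathlib
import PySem

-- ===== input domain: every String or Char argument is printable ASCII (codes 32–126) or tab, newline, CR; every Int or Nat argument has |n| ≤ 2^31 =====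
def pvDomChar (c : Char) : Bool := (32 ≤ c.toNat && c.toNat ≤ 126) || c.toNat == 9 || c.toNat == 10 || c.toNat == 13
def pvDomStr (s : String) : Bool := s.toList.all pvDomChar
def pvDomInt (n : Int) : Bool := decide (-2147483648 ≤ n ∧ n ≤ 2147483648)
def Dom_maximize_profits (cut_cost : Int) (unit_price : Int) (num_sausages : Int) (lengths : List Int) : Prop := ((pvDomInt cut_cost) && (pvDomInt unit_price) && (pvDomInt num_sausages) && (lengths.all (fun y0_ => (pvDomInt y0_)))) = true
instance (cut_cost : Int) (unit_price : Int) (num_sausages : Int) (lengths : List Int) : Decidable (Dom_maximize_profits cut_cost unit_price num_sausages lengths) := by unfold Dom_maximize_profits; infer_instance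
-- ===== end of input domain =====

-- B replaces A's per-L rescan of all sausages by a counting dict and one descending
-- sweep maintaining the count and sum of lengths above L (objective: faster).

-- ===== PORT A =====
def maximize_profits (cut_cost : Int) (unit_price : Int) (num_sausages : Int) (lengths : List Int) : Int :=
  let max_length := (PySem.List.max? lengths (fun y => y)).getD 0
  let max_profit : Int := 0
  (PySem.List.pyRange 1 (max_length + 1) 1).foldl
    (fun max_profit L =>
      let total_length := lengths.foldl (fun acc sausage => acc + max 0 (sausage - L)) 0
      let total_cut_cost := total_length * cut_cost
      let total_profit := total_length * L * unit_price - total_cut_cost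
      max max_profit total_profit) max_profit

-- ===== PORT B =====
-- cnt[s] = cnt.get(s, 0) + 1  is  Dict.modify s 0 (· + 1)  (modify k d0 f = insert k (f (getD k d0)))
def maximize_profits_alt (cut_cost : Int) (unit_price : Int) (num_sausages : Int) (lengths : List Int) : Int :=
  let max_length := (PySem.List.max? lengths (fun y => y)).getD 0
  let cnt := lengths.foldl (fun d s => d.modify s 0 (· + 1)) (PySem.Dict.empty)
  let st := (PySem.List.pyRange max_length 0 (-1)).foldl
    (fun (st : Int × Int × Int) L =>
      let profit := (st.2.2 - st.2.1 * L) * (L * unit_price - cut_cost)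
      let best := if profit > st.1 then profit else st.1
      let c := cnt.getD L 0
      (best, st.2.1 + c, st.2.2 + L * c)) ((0 : Int), (0 : Int), (0 : Int))
  st.1

-- ===== PRECONDITION & SPEC =====
-- Pre_ excludes only the empty list, on which A's max(lengths) raises ValueError (B raises there too).
def Pre_maximize_profits (cut_cost : Int) (unit_price : Int) (num_sausages : Int) (lengths : List Int) : Prop := lengths ≠ []
instance (cut_cost : Int) (unit_price : Int) (num_sausages : Int) (lengths : List Int) : Decidable (Pre_maximize_profits cut_cost unit_price num_sausages lengths) := by unfold Pre_maximize_profits; infer_instance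
def pvWitness_maximize_profits : Int × Int × Int × List Int := (1, 3, 3, [5, 2, 5])

def Spec_maximize_profits (cut_cost : Int) (unit_price : Int) (num_sausages : Int) (lengths : List Int) (out : Int) : Prop := out = maximize_profits_alt cut_cost unit_price num_sausages lengths
instance (cut_cost : Int) (unit_price : Int) (num_sausages : Int) (lengths : List Int) (out : Int) : Decidable (Spec_maximize_profits cut_cost unit_price num_sausages lengths out) := by unfold Spec_maximize_profits; infer_instance

-- ===== CLAIM (what is proved, stated in full; the proofs are below) =====
def Claim_equal_maximize_profits : Prop := ∀ (cut_cost : Int) (unit_price : Int) (num_sausages : Int) (lengths : List Int), Dom_maximize_profits cut_cost unit_price num_sausages lengths → Pre_maximize_profits cut_cost unit_price num_sausages lengths → Spec_maximize_profits cut_cost unit_price num_sausages lengths (maximize_profits cut_cost unit_price num_sausages lengths)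

-- ===== LEMMAS AND PROOFS =====

-- count (as Int) and sum of the lengths strictly above L
def pvNA (lens : List Int) (L : Int) : Int := ((lens.filter (fun s => decide (L < s))).length : Int)
def pvSA (lens : List Int) (L : Int) : Int := (lens.filter (fun s => decide (L < s))).sum
def pvProf (cut_cost unit_price : Int) (lens : List Int) (L : Int) : Int :=
  (pvSA lens L - pvNA lens L * L) * (L * unit_price - cut_cost)

lemma pv_excess_eq (L : Int) (lens : List Int) : ∀ init : Int,
    lens.foldl (fun a s => a + max 0 (s - L)) init = init + (pvSA lens L - pvNA lens L * L) := by
  induction lens with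
  | nil => intro init; simp [pvSA, pvNA]
  | cons s l ih =>
    intro init
    by_cases h : L < s
    · have hm : max 0 (s - L) = s - L := by omega
      simp only [List.foldl_cons, ih, pvSA, pvNA, List.filter_cons, h, decide_true, if_true,
        hm, List.sum_cons, List.length_cons]
      push_cast
      ring
    · have hm : max 0 (s - L) = 0 := by omega
      simp [List.foldl_cons, ih, pvSA, pvNA, h, hm]

lemma pv_NA_succ (lens : List Int) (L : Int) :
    pvNA lens L = pvNA lens (L + 1) + (lens.count (L + 1) : Int) := by
  induction lens with
  | nil => simp [pvNA]
  | cons a l ih =>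
    simp only [pvNA, List.filter_cons, List.count_cons, beq_iff_eq] at ih ⊢
    by_cases h3 : a = L + 1
    · subst h3
      have hx : L < L + 1 := by omega
      have hy : ¬ (L + 1 < L + 1) := by omega
      simp [hx]
      omega
    · by_cases h1 : L < a
      · have h2 : L + 1 < a := by omega
        simp [h1, h2, h3]
        omega
      · have h2 : ¬ (L + 1 < a) := by omega
        simp only [h1, h2, h3, decide_false, Bool.false_eq_true, if_false]
        omega

lemma pv_SA_succ (lens : List Int) (L : Int) :
    pvSA lens L = pvSA lens (L + 1) + (L + 1) * (lens.count (L + 1) : Int) := by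
  induction lens with
  | nil => simp [pvSA]
  | cons a l ih =>
    simp only [pvSA, List.filter_cons, List.count_cons, beq_iff_eq] at ih ⊢
    by_cases h3 : a = L + 1
    · subst h3
      have hx : L < L + 1 := by omega
      have hy : ¬ (L + 1 < L + 1) := by omega
      simp [hx]
      rw [ih]
      ring
    · by_cases h1 : L < a
      · have h2 : L + 1 < a := by omega
        simp [h1, h2, h3]
        rw [ih]
        ring
      · have h2 : ¬ (L + 1 < a) := by omega
        simp only [h1, h2, h3, decide_false, Bool.false_eq_true, if_false]
        rw [ih]
        norm_num

lemma pv_filter_nil_of_max (lens : List Int) (M : Int) (h : ∀ y ∈ lens, y ≤ M) :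
    lens.filter (fun s => decide (M < s)) = [] := by
  apply List.filter_eq_nil_iff.mpr
  intro a ha
  simp only [decide_eq_true_eq]
  exact not_lt.mpr (h a ha)

lemma pv_cnt_getD (lens : List Int) (L : Int) :
    (lens.foldl (fun d s => d.modify s 0 (· + 1)) (PySem.Dict.empty)).getD L 0 = (lens.count L : Int) := by
  have := PySem.Dict.getD_counter lens L
  simpa [PySem.Dict.counter_eq_foldl] using this

-- if-then-else form of max on Int
lemma pv_if_max (b p : Int) : (if p > b then p else b) = max b p := by omega

-- the descending sweep computes the running max of pvProf, given correct initial counters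
lemma pv_descend (cut_cost unit_price : Int) (lens : List Int) : ∀ (k : Nat) (b : Int),
    ((PySem.List.pyRange (k : Int) 0 (-1)).foldl
      (fun (st : Int × Int × Int) L =>
        let profit := (st.2.2 - st.2.1 * L) * (L * unit_price - cut_cost)
        let best := if profit > st.1 then profit else st.1
        let c := (lens.foldl (fun d s => d.modify s 0 (· + 1)) (PySem.Dict.empty)).getD L 0
        (best, st.2.1 + c, st.2.2 + L * c)) (b, pvNA lens k, pvSA lens k)) =
    ((PySem.List.pyRange (k : Int) 0 (-1)).foldl
      (fun a L => max a (pvProf cut_cost unit_price lens L)) b, pvNA lens 0, pvSA lens 0) := by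
  intro k
  induction k with
  | zero =>
    intro b
    rw [PySem.List.pyRange_neg_one_eq_nil (by norm_num)]
    simp
  | succ k ih =>
    intro b
    have hk : ((k + 1 : Nat) : Int) = (k : Int) + 1 := by push_cast; ring
    rw [hk, PySem.List.pyRange_neg_one_cons (by positivity), show (k : Int) + 1 - 1 = (k : Int) by ring]
    have e1 : (List.foldl (fun d s => d.modify s 0 (· + 1)) PySem.Dict.empty lens).getD ((k : Int) + 1) 0 = (lens.count ((k : Int) + 1) : Int) := pv_cnt_getD lens _
    simp only [List.foldl_cons, e1]
    rw [pv_if_max]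
    have hNA : pvNA lens (k : Int) + (lens.count ((k : Int) + 1) : Int) - (lens.count ((k : Int) + 1) : Int) = pvNA lens (k : Int) := by ring
    rw [show pvNA lens ((k : Int) + 1) + (lens.count ((k : Int) + 1) : Int) = pvNA lens (k : Int) from (pv_NA_succ lens (k : Int)).symm,
        show pvSA lens ((k : Int) + 1) + ((k : Int) + 1) * (lens.count ((k : Int) + 1) : Int) = pvSA lens (k : Int) from (pv_SA_succ lens (k : Int)).symm]
    have := ih (max b ((pvSA lens ((k : Int) + 1) - pvNA lens ((k : Int) + 1) * ((k : Int) + 1)) * (((k : Int) + 1) * unit_price - cut_cost)))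
    rw [this]
    rfl

-- folding a running max over a reversed list gives the same result
lemma pv_foldl_max_push (h : Int → Int) (c : Int) : ∀ (l : List Int) (b : Int),
    l.foldl (fun a L => max a (h L)) (max b c) = max (l.foldl (fun a L => max a (h L)) b) c := by
  intro l
  induction l with
  | nil => intro b; rfl
  | cons x t ih =>
    intro b
    simp only [List.foldl_cons]
    rw [show max (max b c) (h x) = max (max b (h x)) c by
          rw [max_right_comm], ih]

lemma pv_foldl_max_reverse (h : Int → Int) : ∀ (l : List Int) (b : Int),
    l.reverse.foldl (fun a L => max a (h L)) b = l.foldl (fun a L => max a (h L)) b := by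
  intro l
  induction l with
  | nil => intro b; rfl
  | cons x t ih =>
    intro b
    simp only [List.reverse_cons, List.foldl_append, List.foldl_cons, List.foldl_nil, ih]
    rw [← pv_foldl_max_push h (h x) t b]

-- ===== VERDICT (by name: the statement is the Claim_ definition above) =====
theorem maximize_profits_spec : Claim_equal_maximize_profits := by
  intro cut_cost unit_price num_sausages lengths _hDom hPre
  unfold Spec_maximize_profits
  match lengths, hPre with
  | x :: t, _ =>
    unfold maximize_profits maximize_profits_alt
    simp only [PySem.List.max?_id_cons, Option.getD_some]
    set M := t.foldl max x with hM
    have hub : ∀ y ∈ x :: t, y ≤ M := by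
      intro y hy
      rcases List.mem_cons.mp hy with rfl | hyt
      · exact (PySem.List.le_foldl_max t y).1
      · exact (PySem.List.le_foldl_max t x).2 y hyt
    by_cases hMpos : M ≤ 0
    · rw [PySem.List.pyRange_one_eq_nil (by omega), PySem.List.pyRange_neg_one_eq_nil hMpos]
      rfl
    · replace hMpos : 0 < M := by omega
      have hMk : M = ((M.toNat : Nat) : Int) := (Int.toNat_of_nonneg (le_of_lt hMpos)).symm
      have hNA0 : pvNA (x :: t) M = 0 := by
        simp [pvNA, pv_filter_nil_of_max (x :: t) M hub]
      have hSA0 : pvSA (x :: t) M = 0 := by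
        simp [pvSA, pv_filter_nil_of_max (x :: t) M hub]
      have hstart : ((0 : Int), (0 : Int), (0 : Int)) = ((0 : Int), pvNA (x :: t) M, pvSA (x :: t) M) := by
        rw [hNA0, hSA0]
      rw [hstart, hMk, pv_descend cut_cost unit_price (x :: t) M.toNat 0]
      rw [← hMk]
      rw [PySem.List.pyRange_neg_one_eq_reverse, show (0 : Int) + 1 = 1 by ring,
          pv_foldl_max_reverse]
      have hfun : (fun (max_profit L : Int) => max max_profit
            (((x :: t).foldl (fun acc sausage => acc + max 0 (sausage - L)) 0) * L * unit_price -
              ((x :: t).foldl (fun acc sausage => acc + max 0 (sausage - L)) 0) * cut_cost)) =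
          fun a L => max a (pvProf cut_cost unit_price (x :: t) L) := by
        funext a L
        have he := pv_excess_eq L (x :: t) 0
        rw [zero_add] at he
        rw [he]
        unfold pvProf
        congr 1
        ring
      rw [hfun]
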